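-- pv_equiv track=rewrite | github.com/martinmose/aoc-2025 | solutions/day6/day6.py | parse_problems_vertical
-- ===== SOURCE A (Python) =====
-- def parse_problems_vertical(data: str) -> list[tuple[list[int], str]]:
--     """Parse the worksheet into individual problems using vertical reading.
--
--     Numbers are read column by column (top digit to bottom digit).
--     Each problem is a tuple of (numbers, operation).
--
--     Args:
--         data: The puzzle input (columnar worksheet)
--
--     Returns:
--         List of (numbers, operation) tuples
--     """
--     lines = data.split("\n")
--     if not lines:
--         return []
--
--     # Pad all lines to the same length
--     max_len = max(len(line) for line in lines)
--     lines = [line.ljust(max_len) for line in lines]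
--
--     num_rows = len(lines)
--     problems = []
--
--     # Track which columns belong to which problem
--     col = 0
--     while col < max_len:
--         # Skip separator columns (all spaces)
--         while col < max_len and all(lines[row][col] == " " for row in range(num_rows)):
--             col += 1
--
--         if col >= max_len:
--             break
--
--         # Find the end of this problem (next all-space column or end)
--         start_col = col
--         while col < max_len and not all(lines[row][col] == " " for row in range(num_rows)):
--             col += 1
--
--         # Extract the problem columns from start_col to col
--         # Last row contains the operation
--         op_line = lines[-1][start_col:col].strip()
--         operation = op_line if op_line in ("+", "*") else None
--
--         if operation:
--             # Read numbers vertically - each column is a number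
--             # Top-to-bottom gives most significant to least significant digit
--             numbers = []
--             for c in range(start_col, col):
--                 digits = ""
--                 for row in range(num_rows - 1):  # Exclude operation row
--                     char = lines[row][c]
--                     if char.isdigit():
--                         digits += char
--                 if digits:
--                     numbers.append(int(digits))
--             problems.append((numbers, operation))
--
--     return problems
-- ===== SOURCE B (Python) =====
-- def parse_problems_vertical(data: str) -> list[tuple[list[int], str]]:
--     """Parse the worksheet into (numbers, operation) problems.
--
--     Transposes the padded grid into a list of vertical column strings, splits
--     that list on blank columns the way str.split keeps empty pieces, and maps
--     each group of column strings to a problem; empty groups are harmless since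
--     their operation string is empty and fails the '+'/'*' test.
--     """
--     rows = data.split("\n")
--     width = max(len(r) for r in rows)
--     rows = [r.ljust(width) for r in rows]
--
--     # Transpose: each column becomes one string, read top to bottom.
--     cols = ["".join(r[c] for r in rows) for c in range(width)]
--
--     # Split the column list on blank columns (columns of spaces only),
--     # keeping empty groups like str.split would.
--     groups = []
--     cur = []
--     for col in cols:
--         if col.strip(" "):
--             cur.append(col)
--         else:
--             groups.append(cur)
--             cur = []
--     groups.append(cur)
--
--     problems = []
--     for group in groups:
--         op = "".join(col[-1] for col in group).strip()
--         if op in ("+", "*"):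
--             nums = []
--             for col in group:
--                 digits = "".join(ch for ch in col[:-1] if ch.isdigit())
--                 if digits:
--                     nums.append(int(digits))
--             problems.append((nums, op))
--     return problems
-- ===== Notes on version B (the rewrite author's own statement) =====
-- stated objective: alternative
-- what changed: Transposes the padded grid into a list of vertical column strings, splits that list on blank columns keeping empty groups (str.split style, one accumulator pass), and maps each group of column strings to a problem with string methods - no column indices, no run bounds, no skip/consume scans over the rows.
import Mathlib
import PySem

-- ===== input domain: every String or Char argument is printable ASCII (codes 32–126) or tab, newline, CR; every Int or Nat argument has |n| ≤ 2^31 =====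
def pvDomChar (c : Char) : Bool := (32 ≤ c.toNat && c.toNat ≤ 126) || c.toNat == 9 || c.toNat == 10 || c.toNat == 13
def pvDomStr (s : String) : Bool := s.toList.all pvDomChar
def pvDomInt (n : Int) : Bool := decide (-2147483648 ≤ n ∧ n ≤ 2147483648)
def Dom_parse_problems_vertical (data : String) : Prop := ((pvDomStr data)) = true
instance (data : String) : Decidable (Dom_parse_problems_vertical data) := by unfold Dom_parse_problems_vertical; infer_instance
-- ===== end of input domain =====

-- B transposes the padded grid into column strings and splits that list on
-- blank columns (keeping harmless empty groups) instead of A's index-driven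
-- skip/consume column scans (alternative decomposition, same asymptotic cost).


-- ===== PORT A =====
-- all(lines[row][col] == " " for row in range(num_rows)); row/char access is
-- pyGetD with a default that is unreachable (indices come from in-range loops)
def pvA_allSpace (lines : List (List Char)) (numRows : Nat) (c : Int) : Bool :=
  (PySem.List.pyRange 0 (numRows : Int)).all
    (fun r => PySem.List.pyGetD (PySem.List.pyGetD lines r []) c ' ' == ' ')

-- inner `while col < max_len and all(...)` skip loop; the fuel argument only
-- bounds the iteration count to make the loop total (maxLen - col steps always
-- suffice, and at exhausted fuel the guard col < maxLen is false anyway)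
def pvA_skip (lines : List (List Char)) (numRows maxLen : Nat) : Nat → Nat → Nat
  | 0, col => col
  | fuel + 1, col =>
    if col < maxLen ∧ pvA_allSpace lines numRows col = true then
      pvA_skip lines numRows maxLen fuel (col + 1)
    else col

-- inner `while col < max_len and not all(...)` consume loop (same fuel guard)
def pvA_consume (lines : List (List Char)) (numRows maxLen : Nat) : Nat → Nat → Nat
  | 0, col => col
  | fuel + 1, col =>
    if col < maxLen ∧ pvA_allSpace lines numRows col = false then
      pvA_consume lines numRows maxLen fuel (col + 1)
    else col

-- `for row in range(num_rows - 1): char = lines[row][c]; if char.isdigit(): digits += char`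
def pvA_digits (lines : List (List Char)) (numRows : Nat) (c : Int) : List Char :=
  (PySem.List.pyRange 0 ((numRows : Int) - 1)).foldl
    (fun digits row =>
      if PySem.Chars.isdigit (PySem.List.pyGetD (PySem.List.pyGetD lines row []) c ' ') then
        digits ++ [PySem.List.pyGetD (PySem.List.pyGetD lines row []) c ' ']
      else digits) []

-- `for c in range(start_col, col): ... if digits: numbers.append(int(digits))`
-- int(digits) always succeeds (digits is a nonempty all-digit string), so .getD 0 is unreachable
def pvA_numbers (lines : List (List Char)) (numRows : Nat) (startCol col : Nat) : List Int :=
  (PySem.List.pyRange (startCol : Int) (col : Int)).foldl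
    (fun numbers c =>
      if !(pvA_digits lines numRows c).isEmpty then
        numbers ++ [(PySem.Int.ofChars? (pvA_digits lines numRows c)).getD 0]
      else numbers) []

-- `while col < max_len:` outer loop; the `operation = op_line if ... else None;
-- if operation:` pair is folded into the single membership test (truthiness of
-- "+"/"*" is always true)
def pvA_loop (lines : List (List Char)) (numRows maxLen : Nat) :
    Nat → Nat → List (List Int × String)
  | 0, _ => []
  | fuel + 1, col =>
    if col < maxLen then
      if pvA_skip lines numRows maxLen (maxLen - col) col < maxLen then
        if PySem.Chars.strip (PySem.List.slice ((PySem.List.pyGet? lines (-1)).getD [])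
              (some ((pvA_skip lines numRows maxLen (maxLen - col) col : Nat) : Int))
              (some ((pvA_consume lines numRows maxLen
                  (maxLen - pvA_skip lines numRows maxLen (maxLen - col) col)
                  (pvA_skip lines numRows maxLen (maxLen - col) col) : Nat) : Int)))
            == ['+'] ||
           PySem.Chars.strip (PySem.List.slice ((PySem.List.pyGet? lines (-1)).getD [])
              (some ((pvA_skip lines numRows maxLen (maxLen - col) col : Nat) : Int))
              (some ((pvA_consume lines numRows maxLen
                  (maxLen - pvA_skip lines numRows maxLen (maxLen - col) col)
                  (pvA_skip lines numRows maxLen (maxLen - col) col) : Nat) : Int)))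
            == ['*'] then
          (pvA_numbers lines numRows (pvA_skip lines numRows maxLen (maxLen - col) col)
              (pvA_consume lines numRows maxLen
                (maxLen - pvA_skip lines numRows maxLen (maxLen - col) col)
                (pvA_skip lines numRows maxLen (maxLen - col) col)),
            String.ofList (PySem.Chars.strip (PySem.List.slice ((PySem.List.pyGet? lines (-1)).getD [])
              (some ((pvA_skip lines numRows maxLen (maxLen - col) col : Nat) : Int))
              (some ((pvA_consume lines numRows maxLen
                  (maxLen - pvA_skip lines numRows maxLen (maxLen - col) col)
                  (pvA_skip lines numRows maxLen (maxLen - col) col) : Nat) : Int))))) ::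
            pvA_loop lines numRows maxLen fuel
              (pvA_consume lines numRows maxLen
                (maxLen - pvA_skip lines numRows maxLen (maxLen - col) col)
                (pvA_skip lines numRows maxLen (maxLen - col) col))
        else
          pvA_loop lines numRows maxLen fuel
            (pvA_consume lines numRows maxLen
              (maxLen - pvA_skip lines numRows maxLen (maxLen - col) col)
              (pvA_skip lines numRows maxLen (maxLen - col) col))
      else []
    else []

-- `if not lines` is kept although data.split("\n") is never empty;
-- max(...) of the nonempty line-length list never returns none, so .getD 0 is unreachable
def parse_problems_vertical (data : String) : List (List Int × String) :=
  let lines := PySem.Chars.splitOn data.toList ['\n']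
  if lines = [] then []
  else
    let maxLen : Int := (PySem.List.max? (lines.map PySem.Chars.len) (fun x => x)).getD 0
    let padded := lines.map (fun line => line ++ List.replicate (maxLen.toNat - line.length) ' ')
    pvA_loop padded padded.length maxLen.toNat (maxLen.toNat + 1) 0

-- ===== PORT B =====
-- Source B loop body `if col.strip(" "): cur.append(col) else: groups.append(cur); cur = []`
-- (state = (groups, cur))
def pvB_groupStep (st : List (List (List Char)) × List (List Char)) (col : List Char) :
    List (List (List Char)) × List (List Char) :=
  if !(PySem.Chars.stripChars col [' ']).isEmpty then (st.1, st.2 ++ [col])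
  else (st.1 ++ [st.2], [])

-- Source B `op = "".join(col[-1] for col in group).strip()`
def pvB_op (group : List (List Char)) : List Char :=
  PySem.Chars.strip (group.map (fun col => (PySem.List.pyGet? col (-1)).getD ' '))

-- Source B `if op in ("+", "*")`
def pvB_cond (group : List (List Char)) : Bool :=
  pvB_op group == ['+'] || pvB_op group == ['*']

-- Source B inner number loop; `digits = "".join(ch for ch in col[:-1] if ch.isdigit())`
-- (col[:-1] is dropLast), `if digits: nums.append(int(digits))`
def pvB_nums (group : List (List Char)) : List Int :=
  group.foldl
    (fun nums col =>
      if !(col.dropLast.filter PySem.Chars.isdigit).isEmpty then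
        nums ++ [(PySem.Int.ofChars? (col.dropLast.filter PySem.Chars.isdigit)).getD 0]
      else nums) []

-- Source B entry: transpose into column strings (r[c] is in range: rows are padded
-- to width), split the column list on blank columns keeping empty groups,
-- then map each group to a problem
def parse_problems_vertical_alt (data : String) : List (List Int × String) :=
  let rows0 := PySem.Chars.splitOn data.toList ['\n']
  let width : Nat := ((PySem.List.max? (rows0.map PySem.Chars.len) (fun x => x)).getD 0).toNat
  let rows := rows0.map (fun r => r ++ List.replicate (width - r.length) ' ')
  let cols : List (List Char) := (List.range width).map (fun c => rows.map (fun r => r.getD c ' '))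
  let st := cols.foldl pvB_groupStep (([] : List (List (List Char))), ([] : List (List Char)))
  let groups := st.1 ++ [st.2]
  groups.foldl
    (fun problems group =>
      if pvB_cond group then
        problems ++ [(pvB_nums group, String.ofList (pvB_op group))]
      else problems) []

-- ===== PRECONDITION & SPEC =====
def Spec_parse_problems_vertical (data : String) (out : List (List Int × String)) : Prop := out = parse_problems_vertical_alt data
instance (data : String) (out : List (List Int × String)) : Decidable (Spec_parse_problems_vertical data out) := by unfold Spec_parse_problems_vertical; infer_instance

-- ===== CLAIM (what is proved, stated in full; the proofs are below) =====
def Claim_equal_parse_problems_vertical : Prop := ∀ (data : String), Dom_parse_problems_vertical data → Spec_parse_problems_vertical data (parse_problems_vertical data)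

-- ===== LEMMAS AND PROOFS =====

theorem pvA_skip_ge (lines : List (List Char)) (numRows maxLen : Nat) :
    ∀ fuel col, col ≤ pvA_skip lines numRows maxLen fuel col := by
  intro fuel
  induction fuel with
  | zero => intro col; simp [pvA_skip]
  | succ f ih =>
    intro col
    simp only [pvA_skip]
    split_ifs with h
    · exact Nat.le_trans (Nat.le_succ col) (ih (col + 1))
    · exact Nat.le_refl col

theorem pvA_consume_ge (lines : List (List Char)) (numRows maxLen : Nat) :
    ∀ fuel col, col ≤ pvA_consume lines numRows maxLen fuel col := by
  intro fuel
  induction fuel with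
  | zero => intro col; simp [pvA_consume]
  | succ f ih =>
    intro col
    simp only [pvA_consume]
    split_ifs with h
    · exact Nat.le_trans (Nat.le_succ col) (ih (col + 1))
    · exact Nat.le_refl col

theorem pvA_skip_le (lines : List (List Char)) (numRows maxLen : Nat) :
    ∀ fuel col, col ≤ maxLen → pvA_skip lines numRows maxLen fuel col ≤ maxLen := by
  intro fuel
  induction fuel with
  | zero => intro col h; simpa [pvA_skip] using h
  | succ f ih =>
    intro col h
    simp only [pvA_skip]
    split_ifs with hc
    · exact ih (col + 1) (by omega)
    · exact h

theorem pvA_consume_le (lines : List (List Char)) (numRows maxLen : Nat) :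
    ∀ fuel col, col ≤ maxLen → pvA_consume lines numRows maxLen fuel col ≤ maxLen := by
  intro fuel
  induction fuel with
  | zero => intro col h; simpa [pvA_consume] using h
  | succ f ih =>
    intro col h
    simp only [pvA_consume]
    split_ifs with hc
    · exact ih (col + 1) (by omega)
    · exact h

theorem pvA_skip_stop (lines : List (List Char)) (numRows maxLen : Nat) :
    ∀ fuel col, maxLen - col ≤ fuel →
      pvA_skip lines numRows maxLen fuel col < maxLen →
      pvA_allSpace lines numRows (pvA_skip lines numRows maxLen fuel col) = false := by
  intro fuel
  induction fuel with
  | zero =>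
    intro col hf h
    simp only [pvA_skip] at h
    omega
  | succ f ih =>
    intro col hf h
    simp only [pvA_skip] at h ⊢
    split_ifs with hc
    · rw [if_pos hc] at h
      exact ih (col + 1) (by omega) h
    · rw [if_neg hc] at h
      rw [Decidable.not_and_iff_or_not] at hc
      rcases hc with hc | hc
      · exact absurd h hc
      · simpa using hc

theorem pvA_consume_stop (lines : List (List Char)) (numRows maxLen : Nat) :
    ∀ fuel col, maxLen - col ≤ fuel →
      pvA_consume lines numRows maxLen fuel col < maxLen →
      pvA_allSpace lines numRows (pvA_consume lines numRows maxLen fuel col) = true := by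
  intro fuel
  induction fuel with
  | zero =>
    intro col hf h
    simp only [pvA_consume] at h
    omega
  | succ f ih =>
    intro col hf h
    simp only [pvA_consume] at h ⊢
    split_ifs with hc
    · rw [if_pos hc] at h
      exact ih (col + 1) (by omega) h
    · rw [if_neg hc] at h
      rw [Decidable.not_and_iff_or_not] at hc
      rcases hc with hc | hc
      · exact absurd h hc
      · simpa using hc

theorem pvA_consume_gt (lines : List (List Char)) (numRows maxLen : Nat)
    (fuel col : Nat) (h1 : col < maxLen) (h2 : pvA_allSpace lines numRows col = false)
    (hf : maxLen - col ≤ fuel) :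
    col < pvA_consume lines numRows maxLen fuel col := by
  obtain ⟨f, rfl⟩ : ∃ f, fuel = f + 1 := ⟨fuel - 1, by omega⟩
  simp only [pvA_consume]
  rw [if_pos ⟨h1, h2⟩]
  have := pvA_consume_ge lines numRows maxLen f (col + 1)
  omega

theorem pvA_skip_all (lines : List (List Char)) (numRows maxLen : Nat) :
    ∀ fuel col c, col ≤ c → c < pvA_skip lines numRows maxLen fuel col →
      pvA_allSpace lines numRows c = true := by
  intro fuel
  induction fuel with
  | zero => intro col c hc1 hc2; simp only [pvA_skip] at hc2; omega
  | succ f ih =>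
    intro col c hc1 hc2
    simp only [pvA_skip] at hc2
    split_ifs at hc2 with h
    · by_cases hc : c = col
      · subst hc; exact h.2
      · exact ih (col + 1) c (by omega) hc2
    · omega

theorem pvA_consume_all (lines : List (List Char)) (numRows maxLen : Nat) :
    ∀ fuel col c, col ≤ c → c < pvA_consume lines numRows maxLen fuel col →
      pvA_allSpace lines numRows c = false := by
  intro fuel
  induction fuel with
  | zero => intro col c hc1 hc2; simp only [pvA_consume] at hc2; omega
  | succ f ih =>
    intro col c hc1 hc2
    simp only [pvA_consume] at hc2
    split_ifs at hc2 with h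
    · by_cases hc : c = col
      · subst hc; exact h.2
      · exact ih (col + 1) c (by omega) hc2
    · omega

-- the sequence of maximal runs of non-separator columns, read off A's loops
def pvRunsFrom (lines : List (List Char)) (numRows maxLen col : Nat) : List (Nat × Nat) :=
  if h : col < maxLen then
    if h1 : pvA_skip lines numRows maxLen (maxLen - col) col < maxLen then
      (pvA_skip lines numRows maxLen (maxLen - col) col,
        pvA_consume lines numRows maxLen
          (maxLen - pvA_skip lines numRows maxLen (maxLen - col) col)
          (pvA_skip lines numRows maxLen (maxLen - col) col)) ::
        pvRunsFrom lines numRows maxLen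
          (pvA_consume lines numRows maxLen
            (maxLen - pvA_skip lines numRows maxLen (maxLen - col) col)
            (pvA_skip lines numRows maxLen (maxLen - col) col))
    else []
  else []
termination_by maxLen - col
decreasing_by
  have hg := pvA_skip_ge lines numRows maxLen (maxLen - col) col
  have hs := pvA_skip_stop lines numRows maxLen (maxLen - col) col (by omega) h1
  have hc := pvA_consume_gt lines numRows maxLen
    (maxLen - pvA_skip lines numRows maxLen (maxLen - col) col)
    (pvA_skip lines numRows maxLen (maxLen - col) col) h1 hs (by omega)
  omega

-- how A processes one run
def pvProc (lines : List (List Char)) (numRows : Nat) (ab : Nat × Nat) :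
    Option (List Int × String) :=
  if PySem.Chars.strip (PySem.List.slice ((PySem.List.pyGet? lines (-1)).getD [])
        (some (ab.1 : Int)) (some (ab.2 : Int))) == ['+'] ||
     PySem.Chars.strip (PySem.List.slice ((PySem.List.pyGet? lines (-1)).getD [])
        (some (ab.1 : Int)) (some (ab.2 : Int))) == ['*'] then
    some (pvA_numbers lines numRows ab.1 ab.2,
      String.ofList (PySem.Chars.strip (PySem.List.slice ((PySem.List.pyGet? lines (-1)).getD [])
        (some (ab.1 : Int)) (some (ab.2 : Int)))))
  else none

theorem pvA_loop_eq_filterMap (lines : List (List Char)) (numRows maxLen : Nat) :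
    ∀ fuel col, maxLen - col < fuel →
      pvA_loop lines numRows maxLen fuel col =
        (pvRunsFrom lines numRows maxLen col).filterMap (pvProc lines numRows) := by
  intro fuel
  induction fuel with
  | zero => intro col hf; omega
  | succ f ih =>
    intro col hf
    by_cases h : col < maxLen
    · by_cases h1 : pvA_skip lines numRows maxLen (maxLen - col) col < maxLen
      · have hg := pvA_skip_ge lines numRows maxLen (maxLen - col) col
        have hs := pvA_skip_stop lines numRows maxLen (maxLen - col) col (by omega) h1
        have hgt := pvA_consume_gt lines numRows maxLen
          (maxLen - pvA_skip lines numRows maxLen (maxLen - col) col)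
          (pvA_skip lines numRows maxLen (maxLen - col) col) h1 hs (by omega)
        have hle := pvA_consume_le lines numRows maxLen
          (maxLen - pvA_skip lines numRows maxLen (maxLen - col) col)
          (pvA_skip lines numRows maxLen (maxLen - col) col) (by omega)
        have hrec := ih (pvA_consume lines numRows maxLen
          (maxLen - pvA_skip lines numRows maxLen (maxLen - col) col)
          (pvA_skip lines numRows maxLen (maxLen - col) col)) (by omega)
        simp only [pvA_loop, if_pos h, if_pos h1]
        conv_rhs => rw [pvRunsFrom]
        rw [dif_pos h, dif_pos h1, List.filterMap_cons]
        simp only [pvProc]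
        split_ifs with hop
        · rw [hrec]; simp only [pvProc]
        · rw [hrec]; simp only [pvProc]
      · simp only [pvA_loop, if_pos h, if_neg h1]
        rw [pvRunsFrom, dif_pos h, dif_neg h1]
        rfl
    · simp only [pvA_loop, if_neg h]
      rw [pvRunsFrom, dif_neg h]
      rfl

theorem pvRange'_split (a b c : Nat) (h1 : a ≤ b) (h2 : b ≤ c) :
    List.range' a (c - a) = List.range' a (b - a) ++ List.range' b (c - b) := by
  have h := List.range'_append (s := a) (m := b - a) (n := c - b) (step := 1)
  have e1 : a + 1 * (b - a) = b := by omega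
  have e2 : b - a + (c - b) = c - a := by omega
  rw [e1, e2] at h
  exact h.symm

theorem pvFilterMap_eq_filter_map {α β : Type} (g : α → Option β) (p : α → Bool)
    (f : α → β) (l : List α) (h : ∀ x ∈ l, g x = if p x then some (f x) else none) :
    l.filterMap g = (l.filter p).map f := by
  induction l with
  | nil => rfl
  | cons x l ih =>
    rw [List.filterMap_cons, List.filter_cons, h x List.mem_cons_self]
    by_cases hp : p x
    · simp only [hp, if_true]
      rw [List.map_cons, ih (fun y hy => h y (List.mem_cons_of_mem _ hy))]
    · simp only [hp, Bool.false_eq_true, if_false]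
      exact ih (fun y hy => h y (List.mem_cons_of_mem _ hy))

theorem pvMap_getD_range {α : Type} (xs : List α) (d : α) (m : Nat) (hm : m ≤ xs.length) :
    (List.range m).map (fun k => xs.getD k d) = xs.take m := by
  induction m with
  | zero => simp
  | succ m ih =>
    rw [List.range_succ, List.map_append, ih (by omega), List.take_add_one]
    simp only [List.map_cons, List.map_nil]
    congr 1
    have hlt : m < xs.length := by omega
    rw [List.getD_eq_getElem xs d hlt]
    simp [List.getElem?_eq_getElem hlt]

theorem pvMap_getD_range' {α : Type} (xs : List α) (d : α) (a b : Nat)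
    (hb : b ≤ xs.length) :
    (List.range' a (b - a)).map (fun k => xs.getD k d) = (xs.drop a).take (b - a) := by
  apply List.ext_getElem
  · simp; omega
  · intro i h1 h2
    simp only [List.getElem_map, List.getElem_range', List.getElem_take, List.getElem_drop]
    have hlen : (List.range' a (b - a)).length = b - a := by simp
    have : a + i * 1 < xs.length := by simp [hlen] at h1; omega
    rw [List.getD_eq_getElem xs d (by omega)]
    congr 1
    omega

theorem pvList_fm_congr {α β : Type} (p1 p2 : α → Bool) (f1 f2 : α → β) (l : List α)
    (hp : ∀ x ∈ l, p1 x = p2 x) (hf : ∀ x ∈ l, f1 x = f2 x) :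
    (l.filter p1).map f1 = (l.filter p2).map f2 := by
  rw [List.filter_congr hp]
  exact List.map_congr_left (fun x hx => hf x (List.mem_filter.mp hx).1)

theorem pvPyRange_natCast (a b : Nat) :
    PySem.List.pyRange (a : Int) (b : Int) = (List.range' a (b - a)).map (fun (n : Nat) => (n : Int)) := by
  rw [PySem.List.pyRange_one, List.range'_eq_map_range, List.map_map]
  have hsub : ((b : Int) - (a : Int)).toNat = b - a := by omega
  rw [hsub]
  apply List.map_congr_left
  intro k _
  simp only [Function.comp]
  push_cast
  ring

-- the column read at c, as B's transposed column string
def pvColOf (rows : List (List Char)) (c : Nat) : List Char :=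
  rows.map (fun r => r.getD c ' ')

-- A reads column c top-down over rows[:-1]; B takes col[:-1] of the column string
theorem pvDigits_eq (lines : List (List Char)) (numRows : Nat) (c : Nat)
    (hn : numRows = lines.length) (h1 : 1 ≤ numRows) :
    pvA_digits lines numRows (c : Int) =
      (pvColOf lines c).dropLast.filter PySem.Chars.isdigit := by
  unfold pvA_digits
  rw [PySem.List.foldl_append_if
    (fun row => PySem.Chars.isdigit (PySem.List.pyGetD (PySem.List.pyGetD lines row []) (c : Int) ' '))
    (fun row => PySem.List.pyGetD (PySem.List.pyGetD lines row []) (c : Int) ' ')]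
  rw [List.nil_append]
  have hcast : ((numRows : Int) - 1) = ((numRows - 1 : Nat) : Int) := by omega
  rw [hcast, PySem.List.pyRange_zero_natCast]
  have hmap : (List.range (numRows - 1)).map
      (fun (k : Nat) => PySem.List.pyGetD (PySem.List.pyGetD lines ((k : Nat) : Int) []) (c : Int) ' ') =
      (pvColOf lines c).dropLast := by
    rw [pvColOf, ← List.map_dropLast, List.dropLast_eq_take, ← hn]
    rw [← pvMap_getD_range lines [] (numRows - 1) (by omega), List.map_map]
    apply List.map_congr_left
    intro k _
    simp only [Function.comp]
    rw [PySem.List.pyGetD_natCast, PySem.List.pyGetD_natCast]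
  rw [List.filter_map, List.map_map, ← hmap, List.filter_map]
  exact pvList_fm_congr _ _ _ _ _ (fun x _ => rfl) (fun x _ => rfl)

-- the all-spaces test over row indices equals the test on the column string
theorem pvAllSpace_eq (lines : List (List Char)) (numRows : Nat) (c : Nat)
    (hn : numRows = lines.length) :
    pvA_allSpace lines numRows (c : Int) =
      (pvColOf lines c).all (fun ch => ch == ' ') := by
  unfold pvA_allSpace
  rw [show (numRows : Int) = PySem.List.len lines by rw [PySem.List.len_eq, hn]]
  rw [pvColOf, List.all_map]
  have hall : lines.all ((fun ch => ch == ' ') ∘ fun r => r.getD c ' ') =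
      ((PySem.List.pyRange 0 (PySem.List.len lines)).map
        (fun j => PySem.List.pyGetD lines j [])).all ((fun ch => ch == ' ') ∘ fun r => r.getD c ' ') := by
    rw [PySem.List.map_pyGetD_pyRange_zero]
  rw [hall, List.all_map]
  congr 1
  funext r
  simp only [Function.comp]
  rw [PySem.List.pyGetD_natCast]

-- col.strip(" ") is falsy exactly when the column is all spaces
theorem pvStripChars_space_isEmpty (cs : List Char) :
    (PySem.Chars.stripChars cs [' ']).isEmpty = cs.all (fun ch => ch == ' ') := by
  unfold PySem.Chars.stripChars
  simp only []
  set q : Char → Bool := fun c => [' '].contains c with hq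
  have hq' : ∀ c, q c = (c == ' ') := by
    intro c
    show [' '].contains c = (c == ' ')
    by_cases h : c = ' '
    · subst h; decide
    · simp [h]
  cases hall : cs.all (fun ch => ch == ' ') with
  | true =>
    have h1 : List.dropWhile q cs = [] := by
      rw [List.dropWhile_eq_nil_iff]
      intro x hx
      rw [hq' x]
      exact (List.all_eq_true.mp hall) x hx
    simp [h1]
  | false =>
    rw [List.all_eq_false] at hall
    obtain ⟨x, hx, hpx⟩ := hall
    have h1 : List.dropWhile q cs ≠ [] := by
      rw [Ne, List.dropWhile_eq_nil_iff]
      intro h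
      exact hpx (by rw [← hq' x]; exact h x hx)
    obtain ⟨y, hy, hpy⟩ : ∃ y ∈ List.dropWhile q cs, ¬ q y = true := by
      refine ⟨(List.dropWhile q cs).head h1, List.head_mem h1, ?_⟩
      simp [List.head_dropWhile_not q h1]
    have h2 : List.dropWhile q (List.dropWhile q cs).reverse ≠ [] := by
      rw [Ne, List.dropWhile_eq_nil_iff]
      intro h
      exact hpy (h y (by simpa using hy))
    simp [h2]

-- B's group processor as a filterMap step
def pvProcB (group : List (List Char)) : Option (List Int × String) :=
  if pvB_cond group then some (pvB_nums group, String.ofList (pvB_op group)) else none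

theorem pvProcB_nil : pvProcB [] = none := by decide

theorem pvB_cond_nil : pvB_cond [] = false := by decide

-- appending to groups commutes with the rest of the split pass
theorem pvClose_acc (l : List (List Char)) :
    ∀ (bs : List (List (List Char))) (cur : List (List Char)),
      (l.foldl pvB_groupStep (bs, cur)).1 ++ [(l.foldl pvB_groupStep (bs, cur)).2] =
        bs ++ ((l.foldl pvB_groupStep ([], cur)).1 ++ [(l.foldl pvB_groupStep ([], cur)).2]) := by
  induction l with
  | nil => intro bs cur; rfl
  | cons col l ih =>
    intro bs cur
    simp only [List.foldl_cons]
    by_cases hb : (PySem.Chars.stripChars col [' ']).isEmpty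
    · rw [show pvB_groupStep (bs, cur) col = (bs ++ [cur], []) by
        simp [pvB_groupStep, hb]]
      rw [show pvB_groupStep (([] : List (List (List Char))), cur) col = ([cur], []) by
        simp [pvB_groupStep, hb]]
      rw [ih (bs ++ [cur]) [], ih [cur] [], List.append_assoc]
    · rw [show pvB_groupStep (bs, cur) col = (bs, cur ++ [col]) by
        simp [pvB_groupStep, hb]]
      rw [show pvB_groupStep (([] : List (List (List Char))), cur) col = ([], cur ++ [col]) by
        simp [pvB_groupStep, hb]]
      exact ih bs (cur ++ [col])

-- a segment of blank columns only inserts empty groups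
theorem pvFold_blank (l : List (List Char))
    (h : ∀ col ∈ l, (PySem.Chars.stripChars col [' ']).isEmpty = true) :
    ∀ bs, l.foldl pvB_groupStep (bs, []) = (bs ++ l.map (fun _ => []), []) := by
  induction l with
  | nil => intro bs; simp
  | cons col l ih =>
    intro bs
    simp only [List.foldl_cons]
    rw [show pvB_groupStep (bs, ([] : List (List Char))) col = (bs ++ [[]], []) by
      simp [pvB_groupStep, h col List.mem_cons_self]]
    rw [ih (fun x hx => h x (List.mem_cons_of_mem _ hx)) (bs ++ [[]])]
    simp

-- a segment of non-blank columns extends the open group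
theorem pvFold_run (l : List (List Char))
    (h : ∀ col ∈ l, (PySem.Chars.stripChars col [' ']).isEmpty = false) :
    ∀ bs cur, l.foldl pvB_groupStep (bs, cur) = (bs, cur ++ l) := by
  induction l with
  | nil => intro bs cur; simp
  | cons col l ih =>
    intro bs cur
    simp only [List.foldl_cons]
    rw [show pvB_groupStep (bs, cur) col = (bs, cur ++ [col]) by
      simp [pvB_groupStep, h col List.mem_cons_self]]
    rw [ih (fun x hx => h x (List.mem_cons_of_mem _ hx)) bs (cur ++ [col])]
    simp

-- empty groups contribute nothing
theorem pvFilterMap_const_nil {α : Type} (l : List α) :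
    ((l.map (fun _ => ([] : List (List Char)))).filterMap pvProcB) = [] := by
  induction l with
  | nil => rfl
  | cons x l ih => simpa [List.filterMap_cons, pvProcB_nil] using ih

-- B's last-row read over a group equals A's slice of the last row
theorem pvOp_run (rows : List (List Char)) (w a b : Nat)
    (hrows : rows ≠ []) (hlen : ∀ r ∈ rows, r.length = w) (hb : b ≤ w) :
    pvB_op ((List.range' a (b - a)).map (pvColOf rows)) =
      PySem.Chars.strip (PySem.List.slice ((PySem.List.pyGet? rows (-1)).getD [])
        (some (a : Int)) (some (b : Int))) := by
  have hL : (PySem.List.pyGet? rows (-1)).getD [] = rows.getLast hrows := by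
    rw [PySem.List.pyGet?_neg_one, List.getLast?_eq_some_getLast hrows]
    rfl
  have hLlen : (rows.getLast hrows).length = w := hlen _ (List.getLast_mem hrows)
  unfold pvB_op
  rw [List.map_map]
  congr 1
  have hpt : ∀ c : Nat, ((fun col => (PySem.List.pyGet? col (-1)).getD ' ') ∘ pvColOf rows) c =
      (rows.getLast hrows).getD c ' ' := by
    intro c
    simp only [Function.comp, pvColOf]
    rw [PySem.List.pyGet?_neg_one, List.getLast?_map, List.getLast?_eq_some_getLast hrows]
    rfl
  rw [List.map_congr_left (fun c _ => hpt c),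
    pvMap_getD_range' (rows.getLast hrows) ' ' a b (by rw [hLlen]; exact hb),
    hL, PySem.List.slice_natCast]

-- B's number read over a group equals A's vertical number loop
theorem pvNums_run (rows : List (List Char)) (a b : Nat)
    (hrows : rows ≠ []) :
    pvB_nums ((List.range' a (b - a)).map (pvColOf rows)) =
      pvA_numbers rows rows.length a b := by
  have h1 : 1 ≤ rows.length := List.length_pos_of_ne_nil hrows
  unfold pvB_nums pvA_numbers
  rw [PySem.List.foldl_append_if
    (fun (col : List Char) => !(col.dropLast.filter PySem.Chars.isdigit).isEmpty)
    (fun (col : List Char) => (PySem.Int.ofChars? (col.dropLast.filter PySem.Chars.isdigit)).getD 0)]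
  rw [PySem.List.foldl_append_if
    (fun (c : Int) => !(pvA_digits rows rows.length c).isEmpty)
    (fun (c : Int) => (PySem.Int.ofChars? (pvA_digits rows rows.length c)).getD 0)]
  rw [List.nil_append, List.nil_append, pvPyRange_natCast a b]
  rw [List.filter_map, List.map_map, List.filter_map, List.map_map]
  apply pvList_fm_congr
  · intro c _
    simp only [Function.comp]
    rw [pvDigits_eq rows rows.length c rfl h1]
  · intro c _
    simp only [Function.comp]
    rw [pvDigits_eq rows rows.length c rfl h1]

-- B's processing of a run's column group equals A's processing of the run
theorem pvProcB_run (rows : List (List Char)) (w a b : Nat)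
    (hrows : rows ≠ []) (hlen : ∀ r ∈ rows, r.length = w)
    (ha : a < b) (hb : b ≤ w) :
    pvProcB ((List.range' a (b - a)).map (pvColOf rows)) = pvProc rows rows.length (a, b) := by
  unfold pvProcB pvB_cond pvProc
  rw [pvOp_run rows w a b hrows hlen hb, pvNums_run rows a b hrows]

-- main lemma: B's split of the transposed column list, filtered through the
-- group processor, yields exactly A's runs filtered through A's processor
theorem pvGroups_main (rows : List (List Char)) (w : Nat)
    (hrows : rows ≠ []) (hlen : ∀ r ∈ rows, r.length = w) :
    ∀ k col, w - col ≤ k → col ≤ w →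
      ((((List.range' col (w - col)).map (pvColOf rows)).foldl pvB_groupStep ([], [])).1 ++
        [(((List.range' col (w - col)).map (pvColOf rows)).foldl pvB_groupStep ([], [])).2]).filterMap pvProcB =
      (pvRunsFrom rows rows.length w col).filterMap (pvProc rows rows.length) := by
  have hBA : ∀ c : Nat, (PySem.Chars.stripChars (pvColOf rows c) [' ']).isEmpty =
      pvA_allSpace rows rows.length (c : Int) := by
    intro c
    rw [pvStripChars_space_isEmpty, ← pvAllSpace_eq rows rows.length c rfl]
  intro k
  induction k with
  | zero =>
    intro col hk hcw
    have hcol : col = w := by omega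
    subst hcol
    rw [Nat.sub_self]
    simp only [List.range'_zero, List.map_nil, List.foldl_nil]
    rw [pvRunsFrom, dif_neg (by omega)]
    simp [List.filterMap_cons, pvProcB_nil]
  | succ k ih =>
    intro col hk hcw
    by_cases hcol : col < w
    · set c1 := pvA_skip rows rows.length w (w - col) col with hc1
      have hgc1 : col ≤ c1 := pvA_skip_ge rows rows.length w (w - col) col
      have hc1w : c1 ≤ w := pvA_skip_le rows rows.length w (w - col) col (by omega)
      rw [pvRange'_split col c1 w hgc1 hc1w, List.map_append, List.foldl_append]
      rw [pvFold_blank _ (fun x hx => by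
          obtain ⟨c, hc, rfl⟩ := List.mem_map.mp hx
          rw [List.mem_range'_1] at hc
          rw [hBA c]
          exact pvA_skip_all rows rows.length w (w - col) col c hc.1 (by omega)) []]
      rw [List.nil_append]
      by_cases h1 : c1 < w
      · set c2 := pvA_consume rows rows.length w (w - c1) c1 with hc2
        have hs : pvA_allSpace rows rows.length (c1 : Int) = false :=
          pvA_skip_stop rows rows.length w (w - col) col (by omega) h1
        have hgt : c1 < c2 := pvA_consume_gt rows rows.length w (w - c1) c1 h1 hs (by omega)
        have hc2w : c2 ≤ w := pvA_consume_le rows rows.length w (w - c1) c1 (by omega)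
        rw [pvRange'_split c1 c2 w (by omega) hc2w, List.map_append, List.foldl_append]
        rw [pvFold_run _ (fun x hx => by
            obtain ⟨c, hc, rfl⟩ := List.mem_map.mp hx
            rw [List.mem_range'_1] at hc
            rw [hBA c]
            exact pvA_consume_all rows rows.length w (w - c1) c1 c (by omega) (by omega)) _ []]
        rw [List.nil_append]
        set E := ((List.range' col (c1 - col)).map (pvColOf rows)).map
          (fun _ => ([] : List (List Char))) with hE
        set block := (List.range' c1 (c2 - c1)).map (pvColOf rows) with hblock
        have hrun : pvProcB block = pvProc rows rows.length (c1, c2) :=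
          pvProcB_run rows w c1 c2 (by simpa using hrows) hlen hgt hc2w
        by_cases h2 : c2 < w
        · have hsep2 : pvA_allSpace rows rows.length (c2 : Int) = true :=
            pvA_consume_stop rows rows.length w (w - c1) c1 (by omega) h2
          have hlast : List.range' c2 (w - c2) = c2 :: List.range' (c2 + 1) (w - c2 - 1) := by
            have e : w - c2 = (w - c2 - 1) + 1 := by omega
            conv_lhs => rw [e]
            rw [List.range'_succ]
          rw [hlast, List.map_cons, List.foldl_cons]
          rw [show pvB_groupStep (E, block) (pvColOf rows c2) = (E ++ [block], []) by
            simp [pvB_groupStep, hBA c2, hsep2]]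
          rw [pvClose_acc _ (E ++ [block]) []]
          have hih := ih c2 (by omega) (by omega)
          rw [hlast, List.map_cons, List.foldl_cons] at hih
          rw [show pvB_groupStep (([] : List (List (List Char))), ([] : List (List Char)))
              (pvColOf rows c2) = ([[]], []) by
            simp [pvB_groupStep, hBA c2, hsep2]] at hih
          rw [pvClose_acc _ [[]] []] at hih
          rw [List.filterMap_append, List.filterMap_cons, pvProcB_nil, List.filterMap_nil,
            List.nil_append] at hih
          rw [List.filterMap_append, List.filterMap_append, pvFilterMap_const_nil,
            List.nil_append, List.filterMap_cons, List.filterMap_nil]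
          conv_rhs => rw [pvRunsFrom]
          rw [dif_pos hcol, ← hc1, dif_pos h1, ← hc2, List.filterMap_cons]
          rw [hrun] at *
          cases hv : pvProc rows rows.length (c1, c2) with
          | none => rw [hv] at *; simp only [List.nil_append]; exact hih
          | some v => rw [hv] at *; simp only [List.cons_append, List.nil_append]; rw [hih]
        · have he : c2 = w := by omega
          rw [he, Nat.sub_self]
          simp only [List.range'_zero, List.map_nil, List.foldl_nil]
          conv_rhs => rw [pvRunsFrom]
          rw [dif_pos hcol, ← hc1, dif_pos h1, ← hc2, he]
          rw [pvRunsFrom, dif_neg (by omega), ← he]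
          simp only [List.filterMap_append, pvFilterMap_const_nil, List.nil_append,
            List.filterMap_cons, List.filterMap_nil, hrun]
          rw [pvFilterMap_const_nil, List.nil_append]
      · have he : c1 = w := by omega
        rw [he, Nat.sub_self]
        simp only [List.range'_zero, List.map_nil, List.foldl_nil]
        rw [List.filterMap_append, pvFilterMap_const_nil, List.nil_append,
          List.filterMap_cons, pvProcB_nil, List.filterMap_nil]
        conv_rhs => rw [pvRunsFrom]
        rw [dif_pos hcol, ← hc1, dif_neg h1]
        rfl
    · have hcol' : col = w := by omega
      subst hcol'
      rw [Nat.sub_self]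
      simp only [List.range'_zero, List.map_nil, List.foldl_nil]
      rw [pvRunsFrom, dif_neg (by omega)]
      simp [List.filterMap_cons, pvProcB_nil]

-- ===== VERDICT (by name: the statement is the Claim_ definition above) =====
theorem parse_problems_vertical_spec : Claim_equal_parse_problems_vertical := by
  intro data _
  unfold Spec_parse_problems_vertical
  by_cases hnil : PySem.Chars.splitOn data.toList ['\n'] = []
  · have hm : PySem.List.max? ([] : List Int) (fun x => x) = none := by
      rw [PySem.List.max?_eq_none_iff]
    simp [parse_problems_vertical, parse_problems_vertical_alt, hnil, hm, pvB_cond_nil]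
  · simp only [parse_problems_vertical, parse_problems_vertical_alt, if_neg hnil]
    set w : Nat := ((PySem.List.max?
        ((PySem.Chars.splitOn data.toList ['\n']).map PySem.Chars.len) (fun x => x)).getD 0).toNat
      with hw
    set rows : List (List Char) := (PySem.Chars.splitOn data.toList ['\n']).map
        (fun r => r ++ List.replicate (w - r.length) ' ')
      with hrows
    have hrows_ne : rows ≠ [] := by
      rw [hrows, Ne, List.map_eq_nil_iff]
      exact hnil
    have hlen : ∀ r ∈ rows, r.length = w := by
      intro r hr
      rw [hrows] at hr
      obtain ⟨r0, hr0, rfl⟩ := List.mem_map.mp hr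
      obtain ⟨m, hm⟩ : ∃ m, PySem.List.max?
          ((PySem.Chars.splitOn data.toList ['\n']).map PySem.Chars.len) (fun x => x) = some m := by
        rcases ho : PySem.List.max?
            ((PySem.Chars.splitOn data.toList ['\n']).map PySem.Chars.len) (fun x => x) with _ | m
        · rw [PySem.List.max?_eq_none_iff, List.map_eq_nil_iff] at ho
          exact absurd ho hnil
        · exact ⟨m, rfl⟩
      have hle := PySem.List.max?_isMax hm (PySem.Chars.len r0) (List.mem_map_of_mem hr0)
      have hlen0 : PySem.Chars.len r0 = (r0.length : Int) := PySem.Chars.len_eq r0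
      have hwm : w = m.toNat := by rw [hw, hm]; rfl
      rw [hlen0] at hle
      simp only [List.length_append, List.length_replicate]
      omega
    rw [pvA_loop_eq_filterMap rows rows.length w (w + 1) 0 (by omega)]
    rw [PySem.List.foldl_append_if pvB_cond
      (fun g => (pvB_nums g, String.ofList (pvB_op g))), List.nil_append]
    rw [← pvFilterMap_eq_filter_map pvProcB pvB_cond
      (fun g => (pvB_nums g, String.ofList (pvB_op g))) _ (fun g _ => rfl)]
    have hcols : (List.range w).map (fun c => rows.map (fun r => r.getD c ' ')) =
        (List.range' 0 w).map (pvColOf rows) := by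
      rw [List.range_eq_range']
      rfl
    rw [hcols]
    have hmain := pvGroups_main rows w hrows_ne hlen w 0 (by omega) (by omega)
    rw [Nat.sub_zero] at hmain
    exact hmain.symm
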